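-- pv_equiv track=rewrite | github.com/alissonlinneker/nova-protocol | sdk/python/nova_sdk/types.py | _convertbits
-- ===== SOURCE A (Python) =====
-- def _convertbits(data: bytes | list[int], frombits: int, tobits: int, pad: bool = True) -> list[int]:
--     acc = 0
--     bits = 0
--     ret: list[int] = []
--     maxv = (1 << tobits) - 1
--     for value in data:
--         if value < 0 or (value >> frombits):
--             raise ValueError(f"invalid value for convertbits: {value}")
--         acc = (acc << frombits) | value
--         bits += frombits
--         while bits >= tobits:
--             bits -= tobits
--             ret.append((acc >> bits) & maxv)
--     if pad:
--         if bits: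
--             ret.append((acc << (tobits - bits)) & maxv)
--     elif bits >= frombits or ((acc << (tobits - bits)) & maxv):
--         raise ValueError("non-zero padding bits")
--     return ret
-- ===== SOURCE B (Python) =====
-- def _convertbits(data, frombits, tobits, pad=True):
--     # B: build the whole input as one big integer, then extract every output
--     # group by direct indexed shifts (closed form) instead of streaming a
--     # bit-window with an inner while-loop.
--     total = 0
--     for value in data:
--         if value < 0 or (value >> frombits):
--             raise ValueError(f"invalid value for convertbits: {value}")
--         total = (total << frombits) | value
--     nbits = len(data) * frombits
--     maxv = (1 << tobits) - 1
--     ret = [(total >> (nbits - (j + 1) * tobits)) & maxv for j in range(nbits // tobits)]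
--     rem = nbits % tobits
--     if pad:
--         if rem:
--             ret.append((total << (tobits - rem)) & maxv)
--     elif rem >= frombits or (total & ((1 << rem) - 1)):
--         raise ValueError("non-zero padding bits")
--     return ret
-- ===== Notes on version B (the rewrite author's own statement) =====
-- stated objective: alternative
-- what changed: A streams a sliding bit-window (acc,bits) with an inner while-loop emitting groups as bits accumulate; B first folds the whole input into one big integer, then produces every output group by a direct closed-form indexed shift-and-mask (a comprehension), with the pad/no-pad leftover handled by one modulus computation.
-- outside the precondition, e.g. on _convertbits([], 3, 0, True): A returns [], B raises ZeroDivisionError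
import Mathlib
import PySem

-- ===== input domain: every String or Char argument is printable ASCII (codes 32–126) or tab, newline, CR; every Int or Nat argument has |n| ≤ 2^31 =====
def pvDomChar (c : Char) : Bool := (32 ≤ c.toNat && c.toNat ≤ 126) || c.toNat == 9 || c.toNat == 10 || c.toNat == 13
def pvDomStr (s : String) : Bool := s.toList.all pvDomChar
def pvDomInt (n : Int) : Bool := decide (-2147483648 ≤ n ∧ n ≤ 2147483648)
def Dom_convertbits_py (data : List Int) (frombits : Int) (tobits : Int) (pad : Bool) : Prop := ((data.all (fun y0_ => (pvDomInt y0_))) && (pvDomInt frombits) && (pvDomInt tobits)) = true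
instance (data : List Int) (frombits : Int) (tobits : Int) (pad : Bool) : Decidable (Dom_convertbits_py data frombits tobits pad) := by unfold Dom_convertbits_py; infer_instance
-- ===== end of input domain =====

-- B replaces A's streamed bit-window (acc/bits state with an inner while-loop) by one big
-- integer built in a single fold, from which every output group is extracted by a direct
-- closed-form indexed shift-and-mask; same return value on all admitted inputs (objective: alternative).

-- ===== PORT A =====
-- the inner 'while bits >= tobits' loop of A; Python order: bits -= tobits, then append (acc >> bits) & maxv.
-- The '1 ≤ tobits' conjunct only makes the recursion total: for tobits ≤ 0 Python raises or loops forever (excluded by Pre_).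
def pvDrainA (tobits maxv acc : Int) (bits : Int) (ret : List Int) : Int × List Int :=
  if h : 1 ≤ tobits ∧ tobits ≤ bits then
    pvDrainA tobits maxv acc (bits - tobits) (ret ++ [PySem.Int.band (acc >>> (bits - tobits).toNat) maxv])
  else (bits, ret)
termination_by bits.toNat
decreasing_by omega

-- A's 'for value in data' loop over the state (acc, bits, ret).
-- Python raises ValueError here when value < 0 or (value >> frombits) ≠ 0, and raises for frombits < 0;
-- those inputs are excluded by Pre_, so the port takes the non-raising path (shift amount via .toNat).
def pvLoopA (frombits tobits maxv : Int) : List Int → Int → Int → List Int → Int × Int × List Int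
  | [], acc, bits, ret => (acc, bits, ret)
  | v :: rest, acc, bits, ret =>
    let acc' := PySem.Int.bor (acc <<< frombits.toNat) v
    let p := pvDrainA tobits maxv acc' (bits + frombits) ret
    pvLoopA frombits tobits maxv rest acc' p.1 p.2

def convertbits_py (data : List Int) (frombits : Int) (tobits : Int) (pad : Bool) : List Int :=
  -- maxv = (1 << tobits) - 1; Python raises for tobits < 0 (excluded by Pre_)
  let maxv : Int := ((1 : Int) <<< tobits.toNat) - 1
  let s := pvLoopA frombits tobits maxv data 0 0 []
  if pad then
    if s.2.1 ≠ 0 then s.2.2 ++ [PySem.Int.band (s.1 <<< (tobits - s.2.1).toNat) maxv] else s.2.2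
  else
    -- Python raises 'non-zero padding bits' when bits ≥ frombits or the padding bits are non-zero (excluded by Pre_)
    s.2.2

-- ===== PORT B =====
def convertbits_py_alt (data : List Int) (frombits : Int) (tobits : Int) (pad : Bool) : List Int :=
  -- validation loop: Python B raises ValueError for invalid values (excluded by Pre_); otherwise it only folds total
  let total := data.foldl (fun a v => PySem.Int.bor (a <<< frombits.toNat) v) 0
  let nbits : Int := data.length * frombits
  let maxv : Int := ((1 : Int) <<< tobits.toNat) - 1
  -- the comprehension [(total >> (nbits - (j+1)*tobits)) & maxv for j in range(nbits // tobits)]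
  let ret := (List.range (nbits / tobits).toNat).map
    (fun (j : Nat) => PySem.Int.band (total >>> (nbits - ((j : Int) + 1) * tobits).toNat) maxv)
  let rem := nbits % tobits
  if pad then
    if rem ≠ 0 then ret ++ [PySem.Int.band (total <<< (tobits - rem).toNat) maxv] else ret
  else
    -- Python B raises 'non-zero padding bits' when rem ≥ frombits or (total & ((1 << rem) - 1)) ≠ 0 (excluded by Pre_)
    ret

-- ===== PRECONDITION & SPEC =====
-- Pre_ holds exactly where A returns normally, except for one stated narrowing: tobits = 0 with
-- data = [], where A returns [] only because its loops never run while B's chunk division raises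
-- ZeroDivisionError (see cites); for every other tobits ≤ 0, or a negative/oversized value, or the
-- no-pad padding check firing, A itself raises or loops forever. The value bound is Python's own
-- test 'value >> frombits == 0', and the no-pad bit test is 'the low rem bits of the last value
-- are zero', both written with shifts.
def Pre_convertbits_py (data : List Int) (frombits : Int) (tobits : Int) (pad : Bool) : Prop :=
  1 ≤ tobits ∧ (data ≠ [] → 0 ≤ frombits) ∧
  (∀ v ∈ data, 0 ≤ v ∧ v >>> frombits.toNat = 0) ∧
  (pad = false →
    (data.length * frombits) % tobits < frombits ∧
    ((data.getLast?.getD 0) >>> ((data.length * frombits) % tobits).toNat)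
        <<< ((data.length * frombits) % tobits).toNat = data.getLast?.getD 0)
instance (data : List Int) (frombits : Int) (tobits : Int) (pad : Bool) : Decidable (Pre_convertbits_py data frombits tobits pad) := by unfold Pre_convertbits_py; infer_instance

def pvWitness_convertbits_py : List Int × Int × Int × Bool := ([1, 0, 31], 5, 8, true)

def Spec_convertbits_py (data : List Int) (frombits : Int) (tobits : Int) (pad : Bool) (out : List Int) : Prop := out = convertbits_py_alt data frombits tobits pad
instance (data : List Int) (frombits : Int) (tobits : Int) (pad : Bool) (out : List Int) : Decidable (Spec_convertbits_py data frombits tobits pad out) := by unfold Spec_convertbits_py; infer_instance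

-- ===== CLAIM (what is proved, stated in full; the proofs are below) =====
def Claim_equal_convertbits_py : Prop := ∀ (data : List Int) (frombits : Int) (tobits : Int) (pad : Bool), Dom_convertbits_py data frombits tobits pad → Pre_convertbits_py data frombits tobits pad → Spec_convertbits_py data frombits tobits pad (convertbits_py data frombits tobits pad)


-- ===== LEMMAS AND PROOFS =====

-- bitwise-to-arithmetic bridges (all operands nonnegative on admitted inputs)
theorem pv_shr (a : Int) (k : Nat) (ha : 0 ≤ a) : a >>> k = a / 2 ^ k := by
  obtain ⟨m, rfl⟩ := Int.eq_ofNat_of_zero_le ha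
  rw [← Int.natCast_shiftRight, Nat.shiftRight_eq_div_pow, Int.natCast_ediv]
  push_cast
  rfl

theorem pv_bor_shl (a v : Int) (k : Nat) (ha : 0 ≤ a) (hv0 : 0 ≤ v) (hv : v < 2 ^ k) :
    PySem.Int.bor (a <<< k) v = a * 2 ^ k + v := by
  obtain ⟨m, rfl⟩ := Int.eq_ofNat_of_zero_le ha
  obtain ⟨n, rfl⟩ := Int.eq_ofNat_of_zero_le hv0
  have hn : n < 2 ^ k := by exact_mod_cast hv
  rw [← Int.natCast_shiftLeft, PySem.Int.bor_natCast, ← Nat.shiftLeft_add_eq_or_of_lt hn]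
  push_cast [Nat.shiftLeft_eq]
  ring

theorem pv_bor_shl_nonneg (a v : Int) (k : Nat) (ha : 0 ≤ a) (hv0 : 0 ≤ v) (hv : v < 2 ^ k) :
    0 ≤ PySem.Int.bor (a <<< k) v := by
  rw [pv_bor_shl a v k ha hv0 hv]; positivity

-- the window shifted out of a longer accumulator is unchanged
theorem pv_window (acc r : Int) (E s : Nat) (ha : 0 ≤ acc) (hr0 : 0 ≤ r) (hr : r < 2 ^ E) :
    (acc * 2 ^ E + r) >>> (s + E) = acc >>> s := by
  have h0 : (0 : Int) ≤ acc * 2 ^ E + r := by positivity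
  rw [pv_shr _ _ h0, pv_shr _ _ ha]
  have hp : (2 : Int) ^ (s + E) = 2 ^ E * 2 ^ s := by rw [pow_add]; ring
  rw [hp, ← Int.ediv_ediv_of_nonneg (by positivity : (0:Int) ≤ 2 ^ E)]
  congr 1
  rw [add_comm, Int.add_mul_ediv_right _ _ (by positivity : (2:Int) ^ E ≠ 0),
    Int.ediv_eq_zero_of_lt hr0 hr]
  ring

-- the big-integer fold: nonnegativity, decomposition and bound
theorem pv_fold_nonneg (k : Nat) (l : List Int) (hv : ∀ v ∈ l, 0 ≤ v ∧ v < 2 ^ k) :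
    ∀ a : Int, 0 ≤ a → 0 ≤ l.foldl (fun x v => PySem.Int.bor (x <<< k) v) a := by
  induction l with
  | nil => intro a ha; simpa using ha
  | cons v rest ih =>
    intro a ha
    obtain ⟨hv0, hvk⟩ := hv v (by simp)
    simpa using ih (fun w hw => hv w (by simp [hw])) _ (pv_bor_shl_nonneg a v k ha hv0 hvk)

theorem pv_fold_decomp (k : Nat) (l : List Int) (hv : ∀ v ∈ l, 0 ≤ v ∧ v < 2 ^ k) :
    ∀ a : Int, 0 ≤ a →
      l.foldl (fun x v => PySem.Int.bor (x <<< k) v) a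
        = a * 2 ^ (k * l.length) + l.foldl (fun x v => PySem.Int.bor (x <<< k) v) 0 := by
  induction l with
  | nil => intro a _; simp
  | cons v rest ih =>
    intro a ha
    obtain ⟨hv0, hvk⟩ := hv v (by simp)
    have hv' : ∀ w ∈ rest, 0 ≤ w ∧ w < 2 ^ k := fun w hw => hv w (by simp [hw])
    simp only [List.foldl_cons]
    rw [pv_bor_shl a v k ha hv0 hvk, pv_bor_shl 0 v k le_rfl hv0 hvk,
      ih hv' _ (by positivity : (0:Int) ≤ a * 2 ^ k + v),
      ih hv' _ (by positivity : (0:Int) ≤ 0 * 2 ^ k + v)]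
    have hk : k * (v :: rest).length = k * rest.length + k := by
      simp [List.length_cons]; ring
    rw [hk, pow_add]
    ring

theorem pv_fold_lt (k : Nat) (l : List Int) (hv : ∀ v ∈ l, 0 ≤ v ∧ v < 2 ^ k) :
    l.foldl (fun x v => PySem.Int.bor (x <<< k) v) 0 < 2 ^ (k * l.length) := by
  induction l with
  | nil => simp
  | cons v rest ih =>
    obtain ⟨hv0, hvk⟩ := hv v (by simp)
    have hv' : ∀ w ∈ rest, 0 ≤ w ∧ w < 2 ^ k := fun w hw => hv w (by simp [hw])
    have h1 := ih hv'
    have h2 := pv_fold_nonneg k rest hv' 0 le_rfl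
    have h3 : (0:Int) < 2 ^ (k * rest.length) := by positivity
    simp only [List.foldl_cons]
    rw [pv_bor_shl 0 v k le_rfl hv0 hvk,
      pv_fold_decomp k rest hv' _ (by positivity : (0:Int) ≤ 0 * 2 ^ k + v)]
    have hk : k * (v :: rest).length = k * rest.length + k := by
      simp [List.length_cons]; ring
    rw [hk, pow_add]
    nlinarith

theorem pv_drain_spec (t maxv acc : Int) (ht : 1 ≤ t) :
    ∀ (bits : Int) (ret : List Int), 0 ≤ bits →
    pvDrainA t maxv acc bits ret =
      (bits % t, ret ++ (List.range (bits / t).toNat).map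
        (fun (i : Nat) => PySem.Int.band (acc >>> (bits - ((i : Int) + 1) * t).toNat) maxv)) := by
  suffices H : ∀ (n : Nat) (bits : Int), bits.toNat = n → ∀ (ret : List Int), 0 ≤ bits →
      pvDrainA t maxv acc bits ret =
        (bits % t, ret ++ (List.range (bits / t).toNat).map
          (fun (i : Nat) => PySem.Int.band (acc >>> (bits - ((i : Int) + 1) * t).toNat) maxv)) by
    intro bits ret hb; exact H bits.toNat bits rfl ret hb
  intro n
  induction n using Nat.strong_induction_on with
  | _ n IH =>
    intro bits hn ret hb
    rw [pvDrainA]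
    by_cases hc : t ≤ bits
    · simp only [ht, hc, and_self, dite_true, dif_pos]
      have hb' : 0 ≤ bits - t := by omega
      rw [IH (bits - t).toNat (by omega) (bits - t) rfl _ hb']
      have e1 : (bits - t) % t = bits % t := Int.sub_emod_right bits t
      have e2 : bits / t = (bits - t) / t + 1 := by
        have : (bits - t) / t = (bits + (-1) * t) / t := by ring_nf
        rw [this, Int.add_mul_ediv_right _ _ (by omega : t ≠ 0)]
        ring
      have e2' : (bits / t).toNat = ((bits - t) / t).toNat + 1 := by
        have h3 : 0 ≤ (bits - t) / t := Int.ediv_nonneg hb' (by omega)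
        omega
      rw [e1, e2', List.range_succ_eq_map, List.map_cons, List.map_map]
      have e3 : (PySem.Int.band (acc >>> (bits - ((0 : Nat) + 1 : Int) * t).toNat) maxv)
          = PySem.Int.band (acc >>> (bits - t).toNat) maxv := by
        norm_num
      have e4 : ((fun i : Nat => PySem.Int.band (acc >>> (bits - ((i : Int) + 1) * t).toNat) maxv) ∘ Nat.succ)
          = fun i : Nat => PySem.Int.band (acc >>> (bits - t - ((i : Int) + 1) * t).toNat) maxv := by
        funext i
        simp only [Function.comp_apply]
        congr 2
        push_cast
        ring
      rw [e4, e3]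
      simp [List.append_assoc]
    · simp only [ht, hc, and_false, true_and, dite_false, dif_neg, not_false_iff]
      have hlt : bits < t := by omega
      rw [Int.emod_eq_of_lt hb hlt, Int.ediv_eq_zero_of_lt hb hlt]
      simp

theorem pv_loop_spec (f t maxv : Int) (ht : 1 ≤ t) (hf : 0 ≤ f) :
    ∀ (data : List Int), (∀ v ∈ data, 0 ≤ v ∧ v < 2 ^ f.toNat) →
    ∀ (acc0 bits0 : Int) (ret0 : List Int), 0 ≤ acc0 → 0 ≤ bits0 → bits0 < t →
    pvLoopA f t maxv data acc0 bits0 ret0 =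
      (data.foldl (fun a v => PySem.Int.bor (a <<< f.toNat) v) acc0,
       (bits0 + data.length * f) % t,
       ret0 ++ (List.range ((bits0 + data.length * f) / t).toNat).map
         (fun (j : Nat) => PySem.Int.band
           ((data.foldl (fun a v => PySem.Int.bor (a <<< f.toNat) v) acc0) >>>
             ((bits0 + data.length * f) - ((j : Int) + 1) * t).toNat) maxv)) := by
  intro data
  induction data with
  | nil =>
    intro _ acc0 bits0 ret0 ha hb0 hb1
    simp only [pvLoopA, List.foldl_nil, List.length_nil, Nat.cast_zero, zero_mul, add_zero]
    rw [Int.emod_eq_of_lt hb0 hb1, Int.ediv_eq_zero_of_lt hb0 hb1]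
    simp
  | cons v rest ih =>
    intro hv acc0 bits0 ret0 ha hb0 hb1
    obtain ⟨hv0, hvk⟩ := hv v (by simp)
    have hv' : ∀ w ∈ rest, 0 ≤ w ∧ w < 2 ^ f.toNat := fun w hw => hv w (by simp [hw])
    have ht0 : t ≠ 0 := by omega
    have htpos : 0 < t := by omega
    simp only [pvLoopA]
    rw [pv_drain_spec t maxv _ ht (bits0 + f) ret0 (by omega)]
    have haccval : PySem.Int.bor (acc0 <<< f.toNat) v = acc0 * 2 ^ f.toNat + v :=
      pv_bor_shl acc0 v f.toNat ha hv0 hvk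
    have ha' : 0 ≤ PySem.Int.bor (acc0 <<< f.toNat) v := by rw [haccval]; positivity
    rw [ih hv' _ ((bits0 + f) % t) _ ha' (Int.emod_nonneg _ ht0) (Int.emod_lt_of_pos _ htpos)]
    -- abbreviations
    set acc' := PySem.Int.bor (acc0 <<< f.toNat) v with hacc'
    set F := rest.foldl (fun a w => PySem.Int.bor (a <<< f.toNat) w) acc' with hF
    set k1 : Int := (bits0 + f) / t with hk1def
    have hk1 : 0 ≤ k1 := Int.ediv_nonneg (by omega) (by omega)
    have hmod : (bits0 + f) % t = bits0 + f - t * k1 := Int.emod_def (bits0 + f) t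
    have hrlf : (0:Int) ≤ (rest.length : Int) * f := by positivity
    have hEcast : ((rest.length : Int) * f) = ((f.toNat * rest.length : Nat) : Int) := by
      push_cast [Int.toNat_of_nonneg hf]; ring
    -- decomposition of the final accumulator
    have hdec := pv_fold_decomp f.toNat rest hv' acc' ha'
    have hR0 := pv_fold_nonneg f.toNat rest hv' 0 le_rfl
    have hRlt := pv_fold_lt f.toNat rest hv'
    -- second component
    have hsnd : ((bits0 + f) % t + (rest.length : Int) * f) % t
        = (bits0 + ((v :: rest).length : Int) * f) % t := by
      rw [Int.emod_add_emod]
      congr 1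
      simp only [List.length_cons]
      push_cast
      ring
    -- the first map, re-expressed through the final accumulator F
    have hmap1 : ∀ i ∈ List.range k1.toNat,
        PySem.Int.band (acc' >>> ((bits0 + f) - ((i : Int) + 1) * t).toNat) maxv
          = PySem.Int.band (F >>> ((bits0 + ((v :: rest).length : Int) * f) - ((i : Int) + 1) * t).toNat) maxv := by
      intro i hi
      have hi' : ((i : Int) + 1) ≤ k1 := by
        have := List.mem_range.mp hi
        omega
      have hs0 : 0 ≤ bits0 + f - ((i : Int) + 1) * t := by
        have h1 : ((i : Int) + 1) * t ≤ k1 * t := mul_le_mul_of_nonneg_right hi' (by omega)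
        have h2 : k1 * t ≤ bits0 + f := Int.ediv_mul_le (bits0 + f) ht0
        omega
      have hTs : (bits0 + ((v :: rest).length : Int) * f) - ((i : Int) + 1) * t
          = (bits0 + f - ((i : Int) + 1) * t) + (rest.length : Int) * f := by
        simp only [List.length_cons]; push_cast; ring
      have hTn : ((bits0 + ((v :: rest).length : Int) * f) - ((i : Int) + 1) * t).toNat
          = (bits0 + f - ((i : Int) + 1) * t).toNat + f.toNat * rest.length := by
        rw [hTs, hEcast]
        omega
      rw [hTn, hF, hdec, pv_window acc' _ _ _ ha' hR0 hRlt]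
    -- the second map is the tail of the combined map
    have hmap2 : ∀ j : Nat,
        PySem.Int.band (F >>> (((bits0 + f) % t + (rest.length : Int) * f) - ((j : Int) + 1) * t).toNat) maxv
          = PySem.Int.band (F >>> ((bits0 + ((v :: rest).length : Int) * f) - (((k1.toNat + j : Nat) : Int) + 1) * t).toNat) maxv := by
      intro j
      congr 2
      rw [hmod]
      simp only [List.length_cons]
      push_cast [Int.toNat_of_nonneg hk1]
      ring
    -- index bookkeeping for the combined range
    have hdiv : (bits0 + ((v :: rest).length : Int) * f) / t
        = ((bits0 + f) % t + (rest.length : Int) * f) / t + k1 := by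
      have hT : bits0 + ((v :: rest).length : Int) * f
          = ((bits0 + f) % t + (rest.length : Int) * f) + t * k1 := by
        rw [hmod]; simp only [List.length_cons]; push_cast; ring
      rw [hT, Int.add_mul_ediv_left _ _ ht0]
    have hx0 : 0 ≤ ((bits0 + f) % t + (rest.length : Int) * f) / t :=
      Int.ediv_nonneg (by have := Int.emod_nonneg (bits0 + f) ht0; omega) (by omega)
    have hcnt : ((bits0 + ((v :: rest).length : Int) * f) / t).toNat
        = k1.toNat + (((bits0 + f) % t + (rest.length : Int) * f) / t).toNat := by
      omega
    -- assemble
    refine Prod.ext ?_ (Prod.ext ?_ ?_)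
    · simp [hF, List.foldl_cons, hacc']
    · simpa using hsnd
    · simp only []
      rw [List.append_assoc]
      congr 1
      rw [List.map_congr_left hmap1, hcnt, List.range_add, List.map_append, List.map_map]
      congr 1
      refine List.map_congr_left ?_
      intro a ha2
      simp only [Function.comp_apply]
      have harith : (bits0 + f) % t + (rest.length : Int) * f - ((a : Int) + 1) * t
          = bits0 + ((v :: rest).length : Int) * f - (((k1.toNat + a : Nat) : Int) + 1) * t := by
        rw [hmod]
        simp only [List.length_cons]
        push_cast [Int.toNat_of_nonneg hk1]
        ring
      rw [harith, hF, hacc']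
      simp only [List.foldl_cons]

-- ===== VERDICT (by name: the statement is the Claim_ definition above) =====
theorem convertbits_py_spec : Claim_equal_convertbits_py := by
  unfold Claim_equal_convertbits_py
  intro data f t pad _hDom hPre
  obtain ⟨ht, hfne, hvshift, _hnp⟩ := hPre
  unfold Spec_convertbits_py
  by_cases hd : data = []
  · subst hd
    simp [convertbits_py, convertbits_py_alt, pvLoopA]
  · have hf : 0 ≤ f := hfne hd
    have hv' : ∀ v ∈ data, 0 ≤ v ∧ v < 2 ^ f.toNat := by
      intro v hm
      obtain ⟨h0, h1⟩ := hvshift v hm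
      refine ⟨h0, ?_⟩
      rw [pv_shr v f.toNat h0] at h1
      by_contra hc
      push_neg at hc
      have hge : (1:Int) ≤ v / 2 ^ f.toNat := by
        rw [Int.le_ediv_iff_mul_le (by positivity)]
        simpa using hc
      omega
    simp only [convertbits_py, convertbits_py_alt]
    rw [pv_loop_spec f t (((1 : Int) <<< t.toNat) - 1) ht hf data hv' 0 0 [] le_rfl le_rfl
      (by omega)]
    simp only [zero_add, List.nil_append]
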